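-- pv_equiv track=rewrite | github.com/jalddak/ps_training | python/with_java/programmers/level 1/옹알이(2).py | solution
-- ===== SOURCE A (Python) =====
-- def solution(babbling):
--     can = {"aya", "ye", "woo", "ma"}
--     answer = 0
--     for word in babbling:
--         before = ''
--         current = ''
--         flag = True
--         for c in word:
--             current += c
--             if current in can and before != current:
--                 before = current
--                 current = ''
--             if len(current) > 3:
--                 break
--         if current != '':
--             flag = False
--         if flag:
--             answer += 1
--     return answer
-- ===== SOURCE B (Python) =====
-- def solution(babbling):
--     def ok(w, prev):
--         if not w:
--             return True
--         return ((w.startswith("aya") and prev != "aya" and ok(w[3:], "aya"))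
--                 or (w.startswith("ye") and prev != "ye" and ok(w[2:], "ye"))
--                 or (w.startswith("woo") and prev != "woo" and ok(w[3:], "woo"))
--                 or (w.startswith("ma") and prev != "ma" and ok(w[2:], "ma")))
--     return sum(1 for w in babbling if ok(w, ""))
-- ===== Notes on version B (the rewrite author's own statement) =====
-- stated objective: alternative
-- what changed: Replaced A's char-by-char accumulator state machine (before/current buffers with a length-4 cutoff) by a token-level recursive descent that strips one whole valid token != previous per step; the per-word check becomes a short recursive predicate and the count a sum over words.
import Mathlib
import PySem

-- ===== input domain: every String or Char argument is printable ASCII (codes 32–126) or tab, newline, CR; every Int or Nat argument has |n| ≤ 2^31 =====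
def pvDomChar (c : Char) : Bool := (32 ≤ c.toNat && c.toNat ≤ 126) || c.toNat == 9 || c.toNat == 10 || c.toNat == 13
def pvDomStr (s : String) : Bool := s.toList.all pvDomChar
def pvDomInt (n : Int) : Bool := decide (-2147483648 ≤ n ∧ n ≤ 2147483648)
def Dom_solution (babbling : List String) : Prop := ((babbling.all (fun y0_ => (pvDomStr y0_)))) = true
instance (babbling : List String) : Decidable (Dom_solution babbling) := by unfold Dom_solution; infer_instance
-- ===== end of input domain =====

-- B replaces A's char-by-char accumulator state machine with token-level recursive
-- descent (strip one whole token per step); objective: alternative algorithm, same cost.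

-- ===== PORT A =====
-- membership test `current in can` for can = {"aya","ye","woo","ma"}
def inCan (cur : List Char) : Bool :=
  cur == ['a','y','a'] || cur == ['y','e'] || cur == ['w','o','o'] || cur == ['m','a']

-- A's inner `for c in word` loop: state (before, current); returns the final `current`
def solLoop : List Char → List Char → List Char → List Char
  | [], _, cur => cur
  | c :: cs, before, cur =>
    let cur2 := cur ++ [c]
    if inCan cur2 && before != cur2 then
      solLoop cs cur2 []
    else if cur2.length > 3 then cur2
    else solLoop cs before cur2

def solution (babbling : List String) : Int :=
  babbling.foldl (fun answer word =>
    let cur := solLoop word.toList [] []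
    let flag := cur = ([] : List Char)   -- flag stays True iff current == ''
    if flag then answer + 1 else answer) 0

-- ===== PORT B =====
-- Source B's recursive `ok(w, prev)`: strip one valid token ≠ prev and recurse
def altOk (w : List Char) (prev : List Char) : Bool :=
  if w = [] then true
  else
    (['a','y','a'].isPrefixOf w && prev != ['a','y','a'] && altOk (w.drop 3) ['a','y','a'])
    || (['y','e'].isPrefixOf w && prev != ['y','e'] && altOk (w.drop 2) ['y','e'])
    || (['w','o','o'].isPrefixOf w && prev != ['w','o','o'] && altOk (w.drop 3) ['w','o','o'])
    || (['m','a'].isPrefixOf w && prev != ['m','a'] && altOk (w.drop 2) ['m','a'])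
termination_by w.length
decreasing_by all_goals (simp only [List.length_drop]; have : 0 < w.length := List.length_pos_iff.mpr (by assumption); omega)

def solution_alt (babbling : List String) : Int :=
  ((babbling.countP (fun w => altOk w.toList [])) : Int)

-- ===== PRECONDITION & SPEC =====
def Spec_solution (babbling : List String) (out : Int) : Prop := out = solution_alt babbling
instance (babbling : List String) (out : Int) : Decidable (Spec_solution babbling out) := by unfold Spec_solution; infer_instance

-- ===== CLAIM (what is proved, stated in full; the proofs are below) =====
def Claim_equal_solution : Prop := ∀ (babbling : List String), Dom_solution babbling → Spec_solution babbling (solution babbling)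

-- ===== LEMMAS AND PROOFS =====

-- once `current` can no longer reach any token, A's inner loop can never end empty
theorem solLoop_stuck (cs : List Char) (before cur : List Char)
    (hne : cur ≠ []) (hst : ∀ ext, inCan (cur ++ ext) = false) :
    solLoop cs before cur ≠ [] := by
  induction cs generalizing before cur with
  | nil => simpa [solLoop] using hne
  | cons c cs ih =>
    have h0 : inCan (cur ++ [c]) = false := hst [c]
    simp only [solLoop, h0, Bool.false_and]
    rw [if_neg (by simp)]
    split
    · simp
    · exact ih before (cur ++ [c]) (by simp) (fun ext => by
        simpa [List.append_assoc] using hst ([c] ++ ext))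

-- one-step unfolding lemmas for altOk (well-founded recursion is unfolded once, by hand)
theorem altOk_nil (prev : List Char) : altOk [] prev = true := by rw [altOk]; simp
theorem altOk_cons (c : Char) (cs prev : List Char) : altOk (c :: cs) prev =
    ((['a','y','a'].isPrefixOf (c :: cs) && prev != ['a','y','a'] && altOk ((c :: cs).drop 3) ['a','y','a'])
    || (['y','e'].isPrefixOf (c :: cs) && prev != ['y','e'] && altOk ((c :: cs).drop 2) ['y','e'])
    || (['w','o','o'].isPrefixOf (c :: cs) && prev != ['w','o','o'] && altOk ((c :: cs).drop 3) ['w','o','o'])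
    || (['m','a'].isPrefixOf (c :: cs) && prev != ['m','a'] && altOk ((c :: cs).drop 2) ['m','a'])) := by
  rw [altOk]; simp

-- the two parsers agree: A's greedy scan ends empty iff B's recursive descent succeeds
theorem loop_eq (cs : List Char) (before : List Char) :
    (solLoop cs before [] = []) ↔ altOk cs before = true := by
  rcases cs with _ | ⟨c1, cs1⟩
  · simp [solLoop, altOk_nil]
  · by_cases h1a : c1 = 'a'
    · subst h1a
      rcases cs1 with _ | ⟨c2, cs2⟩
      · simp [solLoop, altOk_nil, altOk_cons, inCan, List.isPrefixOf]
      · by_cases h2 : c2 = 'y'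
        · subst h2
          rcases cs2 with _ | ⟨c3, cs3⟩
          · simp [solLoop, altOk_nil, altOk_cons, inCan, List.isPrefixOf]
          · by_cases h3 : c3 = 'a'
            · subst h3
              by_cases hb : before = ['a','y','a']
              · subst hb
                constructor
                · intro h
                  have h' : solLoop cs3 ['a','y','a'] ['a','y','a'] = [] := by
                    simpa [solLoop, inCan] using h
                  rcases cs3 with _ | ⟨c4, r⟩
                  · simp [solLoop] at h'
                  · simp [solLoop, inCan] at h'
                · intro h
                  simp [altOk_cons, altOk_nil, List.isPrefixOf] at h
              · have key := loop_eq cs3 ['a','y','a']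
                constructor
                · intro h
                  have hL : solLoop cs3 ['a','y','a'] [] = [] := by
                    simpa [solLoop, inCan, hb] using h
                  simp [altOk_cons, altOk_nil, List.isPrefixOf, hb, key.mp hL]
                · intro h
                  have hR : altOk cs3 ['a','y','a'] = true := by
                    simpa [altOk_cons, altOk_nil, List.isPrefixOf, hb] using h
                  simp [solLoop, inCan, hb, key.mpr hR]
            · constructor
              · intro h
                have h' : solLoop cs3 before ['a','y',c3] = [] := by
                  simpa [solLoop, inCan, h3] using h
                exact absurd h' (solLoop_stuck cs3 _ _ (by simp) (fun ext => by simp [inCan, h3]))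
              · intro h
                simp [altOk_cons, altOk_nil, List.isPrefixOf, h3, Ne.symm h3] at h
        · constructor
          · intro h
            have h' : solLoop cs2 before ['a',c2] = [] := by
              simpa [solLoop, inCan, h2] using h
            exact absurd h' (solLoop_stuck cs2 _ _ (by simp) (fun ext => by simp [inCan, h2]))
          · intro h
            simp [altOk_cons, altOk_nil, List.isPrefixOf, h2, Ne.symm h2] at h
    · by_cases h1y : c1 = 'y'
      · subst h1y
        rcases cs1 with _ | ⟨c2, cs2⟩
        · simp [solLoop, altOk_nil, altOk_cons, inCan, List.isPrefixOf]
        · by_cases h2 : c2 = 'e'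
          · subst h2
            by_cases hb : before = ['y','e']
            · subst hb
              constructor
              · intro h
                have h' : solLoop cs2 ['y','e'] ['y','e'] = [] := by
                  simpa [solLoop, inCan] using h
                rcases cs2 with _ | ⟨c3, r⟩
                · simp [solLoop] at h'
                · have h'' : solLoop r ['y','e'] ['y','e',c3] = [] := by
                    simpa [solLoop, inCan] using h'
                  exact absurd h'' (solLoop_stuck r _ _ (by simp) (fun ext => by simp [inCan]))
              · intro h
                simp [altOk_cons, altOk_nil, List.isPrefixOf] at h
            · have key := loop_eq cs2 ['y','e']
              constructor
              · intro h
                have hL : solLoop cs2 ['y','e'] [] = [] := by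
                  simpa [solLoop, inCan, hb] using h
                simp [altOk_cons, altOk_nil, List.isPrefixOf, hb, key.mp hL]
              · intro h
                have hR : altOk cs2 ['y','e'] = true := by
                  simpa [altOk_cons, altOk_nil, List.isPrefixOf, hb] using h
                simp [solLoop, inCan, hb, key.mpr hR]
          · constructor
            · intro h
              have h' : solLoop cs2 before ['y',c2] = [] := by
                simpa [solLoop, inCan, h2] using h
              exact absurd h' (solLoop_stuck cs2 _ _ (by simp) (fun ext => by simp [inCan, h2]))
            · intro h
              simp [altOk_cons, altOk_nil, List.isPrefixOf, h2, Ne.symm h2] at h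
      · by_cases h1w : c1 = 'w'
        · subst h1w
          rcases cs1 with _ | ⟨c2, cs2⟩
          · simp [solLoop, altOk_nil, altOk_cons, inCan, List.isPrefixOf]
          · by_cases h2 : c2 = 'o'
            · subst h2
              rcases cs2 with _ | ⟨c3, cs3⟩
              · simp [solLoop, altOk_nil, altOk_cons, inCan, List.isPrefixOf]
              · by_cases h3 : c3 = 'o'
                · subst h3
                  by_cases hb : before = ['w','o','o']
                  · subst hb
                    constructor
                    · intro h
                      have h' : solLoop cs3 ['w','o','o'] ['w','o','o'] = [] := by
                        simpa [solLoop, inCan] using h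
                      rcases cs3 with _ | ⟨c4, r⟩
                      · simp [solLoop] at h'
                      · simp [solLoop, inCan] at h'
                    · intro h
                      simp [altOk_cons, altOk_nil, List.isPrefixOf] at h
                  · have key := loop_eq cs3 ['w','o','o']
                    constructor
                    · intro h
                      have hL : solLoop cs3 ['w','o','o'] [] = [] := by
                        simpa [solLoop, inCan, hb] using h
                      simp [altOk_cons, altOk_nil, List.isPrefixOf, hb, key.mp hL]
                    · intro h
                      have hR : altOk cs3 ['w','o','o'] = true := by
                        simpa [altOk_cons, altOk_nil, List.isPrefixOf, hb] using h
                      simp [solLoop, inCan, hb, key.mpr hR]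
                · constructor
                  · intro h
                    have h' : solLoop cs3 before ['w','o',c3] = [] := by
                      simpa [solLoop, inCan, h3] using h
                    exact absurd h' (solLoop_stuck cs3 _ _ (by simp) (fun ext => by simp [inCan, h3]))
                  · intro h
                    simp [altOk_cons, altOk_nil, List.isPrefixOf, h3, Ne.symm h3] at h
            · constructor
              · intro h
                have h' : solLoop cs2 before ['w',c2] = [] := by
                  simpa [solLoop, inCan, h2] using h
                exact absurd h' (solLoop_stuck cs2 _ _ (by simp) (fun ext => by simp [inCan, h2]))
              · intro h
                simp [altOk_cons, altOk_nil, List.isPrefixOf, h2, Ne.symm h2] at h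
        · by_cases h1m : c1 = 'm'
          · subst h1m
            rcases cs1 with _ | ⟨c2, cs2⟩
            · simp [solLoop, altOk_nil, altOk_cons, inCan, List.isPrefixOf]
            · by_cases h2 : c2 = 'a'
              · subst h2
                by_cases hb : before = ['m','a']
                · subst hb
                  constructor
                  · intro h
                    have h' : solLoop cs2 ['m','a'] ['m','a'] = [] := by
                      simpa [solLoop, inCan] using h
                    rcases cs2 with _ | ⟨c3, r⟩
                    · simp [solLoop] at h'
                    · have h'' : solLoop r ['m','a'] ['m','a',c3] = [] := by
                        simpa [solLoop, inCan] using h'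
                      exact absurd h'' (solLoop_stuck r _ _ (by simp) (fun ext => by simp [inCan]))
                  · intro h
                    simp [altOk_cons, altOk_nil, List.isPrefixOf] at h
                · have key := loop_eq cs2 ['m','a']
                  constructor
                  · intro h
                    have hL : solLoop cs2 ['m','a'] [] = [] := by
                      simpa [solLoop, inCan, hb] using h
                    simp [altOk_cons, altOk_nil, List.isPrefixOf, hb, key.mp hL]
                  · intro h
                    have hR : altOk cs2 ['m','a'] = true := by
                      simpa [altOk_cons, altOk_nil, List.isPrefixOf, hb] using h
                    simp [solLoop, inCan, hb, key.mpr hR]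
              · constructor
                · intro h
                  have h' : solLoop cs2 before ['m',c2] = [] := by
                    simpa [solLoop, inCan, h2] using h
                  exact absurd h' (solLoop_stuck cs2 _ _ (by simp) (fun ext => by simp [inCan, h2]))
                · intro h
                  simp [altOk_cons, altOk_nil, List.isPrefixOf, h2, Ne.symm h2] at h
          · constructor
            · intro h
              have h' : solLoop cs1 before [c1] = [] := by
                simpa [solLoop, inCan, h1a, h1y, h1w, h1m] using h
              exact absurd h' (solLoop_stuck cs1 _ _ (by simp)
                (fun ext => by simp [inCan, h1a, h1y, h1w, h1m]))
            · intro h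
              simp [altOk_cons, altOk_nil, List.isPrefixOf, h1a, Ne.symm h1a, h1y, Ne.symm h1y, h1w, Ne.symm h1w, h1m, Ne.symm h1m] at h
termination_by cs.length

-- the outer loops: A's counting foldl equals B's countP
theorem fold_count (l : List String) (acc : Int) :
    (l.foldl (fun answer word =>
      let cur := solLoop word.toList [] []
      let flag := cur = ([] : List Char)
      if flag then answer + 1 else answer) acc)
    = acc + ((l.countP (fun w => altOk w.toList [])) : Int) := by
  induction l generalizing acc with
  | nil => simp
  | cons w l ih =>
    simp only [List.foldl, List.countP_cons]
    rw [ih]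
    by_cases h : solLoop w.toList [] [] = []
    · have hb := (loop_eq w.toList []).mp h
      simp only [h, hb, if_pos, if_true]
      push_cast
      ring
    · have hb : altOk w.toList [] = false := by
        cases hx : altOk w.toList []
        · rfl
        · exact absurd ((loop_eq w.toList []).mpr hx) h
      simp [h, hb]

theorem solution_spec : Claim_equal_solution := by
  intro babbling _
  unfold Spec_solution solution solution_alt
  simpa using fold_count babbling 0
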